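-- pv_equiv track=rewrite | github.com/Mi524/common_utils_data | common_utils_data/sequence_functions.py | sublist_combinations_all
-- ===== SOURCE A (Python) =====
-- from itertools import combinations
--
-- def sublist_combinations_all(value_list):
-- 	"""获取一个完整列表的所有有序子列表的组成可能"""
-- 	value_len = len(value_list)
-- 	value_combination_list = [ ]
-- 	for i in range(2,value_len+1):
-- 		value_combination = combinations(value_list,i)
-- 		for c in value_combination:
-- 			value_combination_list.append(list(c))
--
-- 	return value_combination_list
-- ===== SOURCE B (Python) =====
-- def sublist_combinations_all(value_list):
--     n = len(value_list)
--     result = []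
--
--     def comb(start, k, cur):
--         if k == 0:
--             result.append(cur[:])
--             return
--         for j in range(start, n - k + 1):
--             cur.append(value_list[j])
--             comb(j + 1, k - 1, cur)
--             cur.pop()
--
--     for i in range(2, n + 1):
--         comb(0, i, [])
--     return result
-- ===== Notes on version B (the rewrite author's own statement) =====
-- stated objective: alternative
-- what changed: Replaces the itertools.combinations library call with an explicit recursive index-backtracking generator comb(start, k, cur) that picks each next index from start onward and maintains the partial sublist in an accumulator, preserving the size-then-lexicographic order.
import Mathlib
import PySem

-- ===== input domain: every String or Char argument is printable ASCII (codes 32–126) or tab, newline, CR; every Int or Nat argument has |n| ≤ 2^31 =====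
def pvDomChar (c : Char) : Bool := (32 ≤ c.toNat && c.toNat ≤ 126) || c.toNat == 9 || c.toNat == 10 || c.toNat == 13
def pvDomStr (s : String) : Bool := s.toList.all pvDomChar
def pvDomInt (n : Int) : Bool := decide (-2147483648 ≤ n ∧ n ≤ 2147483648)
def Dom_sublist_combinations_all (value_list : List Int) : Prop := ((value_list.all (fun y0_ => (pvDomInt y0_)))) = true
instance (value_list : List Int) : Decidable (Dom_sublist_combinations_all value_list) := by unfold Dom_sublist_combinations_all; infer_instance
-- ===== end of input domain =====

-- B replaces itertools.combinations by an explicit index-backtracking generator; objective: alternative decomposition, same output.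
-- (In both ports the Python list being appended to is transcribed as an Array built with push, Python's O(1) append.)

-- ===== PORT A =====
-- itertools.combinations(xs, k) in index-lexicographic order (exact for combinations over a list)
def combsA : Nat → List Int → List (List Int)
  | 0, _ => [[]]
  | _ + 1, [] => []
  | k + 1, x :: xs => (combsA k xs).map (fun c => x :: c) ++ combsA (k + 1) xs

def sublist_combinations_all (value_list : List Int) : List (List Int) :=
  let value_len := value_list.length
  ((PySem.List.pyRange 2 ((value_len : Int) + 1) 1).foldl
    (fun acc i => (combsA i.toNat value_list).foldl (fun a c => a.push c) acc)
    (#[] : Array (List Int))).toList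

-- ===== PORT B =====
-- comb(start, k, cur): pick index j from start..n-k, recurse with k-1 from j+1
-- (cur is the partial sublist, res the shared result list being appended to)
def combB (vl : List Int) (start k : Nat) (cur : List Int) (res : Array (List Int)) :
    Array (List Int) :=
  match k with
  | 0 => res.push cur
  | k' + 1 =>
      (List.range' start (vl.length - k' - start)).foldl
        (fun r j => combB vl (j + 1) k' (cur ++ [vl.getD j 0]) r) res
termination_by k

def sublist_combinations_all_alt (value_list : List Int) : List (List Int) :=
  let n := value_list.length
  ((PySem.List.pyRange 2 ((n : Int) + 1) 1).foldl
    (fun res i => combB value_list 0 i.toNat [] res)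
    (#[] : Array (List Int))).toList

-- ===== PRECONDITION & SPEC =====
def Spec_sublist_combinations_all (value_list : List Int) (out : List (List Int)) : Prop := out = sublist_combinations_all_alt value_list
instance (value_list : List Int) (out : List (List Int)) : Decidable (Spec_sublist_combinations_all value_list out) := by unfold Spec_sublist_combinations_all; infer_instance

-- ===== CLAIM (what is proved, stated in full; the proofs are below) =====
def Claim_equal_sublist_combinations_all : Prop := ∀ (value_list : List Int), Dom_sublist_combinations_all value_list → Spec_sublist_combinations_all value_list (sublist_combinations_all value_list)

-- ===== LEMMAS AND PROOFS =====

theorem combsA_nil_of_short : ∀ (l : List Int) (k : Nat), l.length < k → combsA k l = [] := by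
  intro l
  induction l with
  | nil => intro k hk; cases k with
      | zero => omega
      | succ k => rfl
  | cons x xs ih =>
      intro k hk
      cases k with
      | zero => omega
      | succ k =>
          simp only [combsA]
          rw [ih k (by simpa using Nat.lt_of_succ_lt_succ hk),
              ih (k + 1) (by simp at hk ⊢; omega)]
          rfl

-- a fold that only pushes contributes its per-element lists, in order
theorem foldl_push_flatMap {α β : Type} (g : Array α → β → Array α) (h : β → List α)
    (H : ∀ (r : Array α) (b : β), (g r b).toList = r.toList ++ h b) :
    ∀ (L : List β) (res : Array α), (L.foldl g res).toList = res.toList ++ L.flatMap h := by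
  intro L
  induction L with
  | nil => intro res; simp
  | cons b L ih => intro res; simp [List.foldl_cons, ih, H res b]

-- the index loop over j = start .. n-k'-1 enumerates combinations of the suffix
theorem flatMap_range'_combsA (vl : List Int) :
    ∀ (c k' start : Nat) (cur : List Int), vl.length - k' - start = c →
      (List.range' start c).flatMap
          (fun j => (combsA k' (vl.drop (j + 1))).map (fun t => (cur ++ [vl.getD j 0]) ++ t))
        = (combsA (k' + 1) (vl.drop start)).map (fun t => cur ++ t) := by
  intro c
  induction c with
  | zero =>
      intro k' start cur hc
      have hshort : (vl.drop start).length < k' + 1 := by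
        simp only [List.length_drop]; omega
      simp [combsA_nil_of_short _ _ hshort]
  | succ c ih =>
      intro k' start cur hc
      have hstart : start < vl.length := by omega
      have hdrop : vl.drop start = vl.getD start 0 :: vl.drop (start + 1) := by
        rw [List.getD_eq_getElem vl 0 hstart]
        exact List.drop_eq_getElem_cons hstart
      rw [List.range'_succ, List.flatMap_cons,
          ih k' (start + 1) cur (by omega), hdrop]
      simp [combsA, List.map_map, Function.comp]

-- main invariant for B's backtracking: it appends exactly the prefixed suffix-combinations
theorem combB_toList (vl : List Int) :
    ∀ (k start : Nat) (cur : List Int) (res : Array (List Int)),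
      (combB vl start k cur res).toList
        = res.toList ++ (combsA k (vl.drop start)).map (fun t => cur ++ t) := by
  intro k
  induction k with
  | zero => intro start cur res; simp [combB, combsA]
  | succ k' ih =>
      intro start cur res
      rw [combB,
          foldl_push_flatMap _ (fun j => (combsA k' (vl.drop (j + 1))).map
            (fun t => (cur ++ [vl.getD j 0]) ++ t)) (fun r j => ih (j + 1) _ r),
          flatMap_range'_combsA vl _ k' start cur rfl]

theorem foldl_toList_congr {γ : Type} (fA fB : Array γ → Int → Array γ) (h : Int → List γ)
    (hA : ∀ (acc : Array γ) (i : Int), (fA acc i).toList = acc.toList ++ h i)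
    (hB : ∀ (acc : Array γ) (i : Int), (fB acc i).toList = acc.toList ++ h i) :
    ∀ (L : List Int) (accA accB : Array γ), accA.toList = accB.toList →
      (L.foldl fA accA).toList = (L.foldl fB accB).toList := by
  intro L
  induction L with
  | nil => intro accA accB he; simpa using he
  | cons i L ih =>
      intro accA accB he
      exact ih _ _ (by rw [hA, hB, he])

-- ===== VERDICT (by name: the statement is the Claim_ definition above) =====
theorem sublist_combinations_all_spec : Claim_equal_sublist_combinations_all := by
  intro vl _
  unfold Spec_sublist_combinations_all sublist_combinations_all sublist_combinations_all_alt
  exact foldl_toList_congr _ _ (fun i => combsA i.toNat vl)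
    (fun acc i => by
      rw [foldl_push_flatMap (fun a c => a.push c) (fun c => [c]) (fun r b => by simp)]
      simp)
    (fun acc i => by rw [combB_toList]; simp)
    _ _ _ rfl
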